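-- pv_equiv track=rewrite | github.com/djplesh/code | ctr_to_timestamp3.py | ctr_rollover
-- ===== SOURCE A (Python) =====
-- def ctr_rollover(ctr):
--     """adjust ctr values for roll over at 2^32 tics"""
--     if len(ctr) < 100:
--         return ctr
--
--     v = 0
--     ctr_full = []
--     ctr_full.append(ctr[0])
--     for k in range(1, len(ctr)):
--         if ctr[k] < ctr[k - 1]:
--             v = v + 1
--         ctr_full.append(ctr[k] + (2**32)*v)
--     return ctr_full
-- ===== SOURCE B (Python) =====
-- def ctr_rollover(ctr):
--     """adjust ctr values for roll over at 2^32 tics"""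
--     if len(ctr) < 100:
--         return ctr
--     n = len(ctr)
--     # pass 1: table of rollover positions (segment boundaries)
--     breaks = [k for k in range(1, n) if ctr[k] < ctr[k - 1]]
--     # pass 2: shift each whole segment by one more multiple of 2**32
--     out = []
--     start = 0
--     off = 0
--     for b in breaks + [n]:
--         out += [c + off for c in ctr[start:b]]
--         start = b
--         off += 2 ** 32
--     return out
-- ===== Notes on version B (the rewrite author's own statement) =====
-- stated objective: alternative
-- what changed: Replaces A's single stateful scan (per-element running rollover counter) by a two-phase segment algorithm: pass 1 builds a table of rollover positions (breaks), pass 2 shifts each whole segment between consecutive breaks by one more multiple of 2**32 via slicing.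
import Mathlib
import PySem

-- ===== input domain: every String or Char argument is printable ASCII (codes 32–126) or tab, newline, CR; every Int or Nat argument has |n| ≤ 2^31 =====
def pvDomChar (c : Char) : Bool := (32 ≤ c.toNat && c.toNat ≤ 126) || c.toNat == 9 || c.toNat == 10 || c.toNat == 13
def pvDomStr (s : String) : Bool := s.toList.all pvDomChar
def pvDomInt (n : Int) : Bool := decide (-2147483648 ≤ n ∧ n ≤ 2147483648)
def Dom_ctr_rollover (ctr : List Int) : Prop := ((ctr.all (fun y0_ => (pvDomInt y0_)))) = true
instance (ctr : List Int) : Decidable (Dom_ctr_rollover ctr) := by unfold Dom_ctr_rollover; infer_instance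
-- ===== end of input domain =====

-- B replaces A's single stateful scan (running rollover counter added element by element) by a
-- two-phase segment algorithm: first a table of rollover positions, then whole segments between
-- consecutive breaks are shifted by one more multiple of 2^32 each; alternative decomposition, same cost.

-- ===== PORT A =====
-- the 'for k in range(1, len(ctr))' loop, as an index recursion over the same state (v, ctr_full)
def ctr_rollover_loop (ctr : List Int) (k : Nat) (v : Int) (ctr_full : List Int) : List Int :=
  if _h : k < ctr.length then
    let v' := if (PySem.List.pyGet? ctr (k : Int)).getD 0 <
                 (PySem.List.pyGet? ctr ((k : Int) - 1)).getD 0 then v + 1 else v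
    ctr_rollover_loop ctr (k + 1) v' (ctr_full ++ [(PySem.List.pyGet? ctr (k : Int)).getD 0 + 2 ^ 32 * v'])
  else ctr_full
termination_by ctr.length - k

def ctr_rollover (ctr : List Int) : List Int :=
  if ctr.length < 100 then ctr
  else ctr_rollover_loop ctr 1 0 [(PySem.List.pyGet? ctr 0).getD 0]

-- ===== PORT B =====
-- the comprehension's predicate 'ctr[k] < ctr[k-1]'
def altDesc (ctr : List Int) (k : Int) : Bool :=
  decide ((PySem.List.pyGet? ctr k).getD 0 < (PySem.List.pyGet? ctr (k - 1)).getD 0)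

-- one iteration of the 'for b in breaks + [n]' loop; state = (out, start, off)
def altStep (ctr : List Int) (st : List Int × Int × Int) (b : Int) : List Int × Int × Int :=
  (st.1 ++ (PySem.List.slice ctr (some st.2.1) (some b)).map (fun c => c + st.2.2),
   b, st.2.2 + 2 ^ 32)

def ctr_rollover_alt (ctr : List Int) : List Int :=
  if ctr.length < 100 then ctr
  else
    let n : Int := (ctr.length : Int)
    let breaks := (PySem.List.pyRange 1 n 1).filter (altDesc ctr)
    ((breaks ++ [n]).foldl (altStep ctr) ([], 0, 0)).1

-- ===== PRECONDITION & SPEC =====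
def Spec_ctr_rollover (ctr : List Int) (out : List Int) : Prop := out = ctr_rollover_alt ctr
instance (ctr : List Int) (out : List Int) : Decidable (Spec_ctr_rollover ctr out) := by unfold Spec_ctr_rollover; infer_instance

-- ===== CLAIM (what is proved, stated in full; the proofs are below) =====
def Claim_equal_ctr_rollover : Prop := ∀ (ctr : List Int), Dom_ctr_rollover ctr → Spec_ctr_rollover ctr (ctr_rollover ctr)

-- ===== LEMMAS AND PROOFS =====

-- common specification: process the tail structurally, carrying previous element and rollover count
def goSpec (prev v : Int) : List Int → List Int
  | [] => []
  | c :: cs =>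
      let v' := if c < prev then v + 1 else v
      (c + 2 ^ 32 * v') :: goSpec c v' cs

theorem loopA_eq_goSpec : ∀ (cs pre : List Int) (prev v : Int) (acc : List Int),
    ctr_rollover_loop (pre ++ prev :: cs) (pre.length + 1) v acc = acc ++ goSpec prev v cs := by
  intro cs
  induction cs with
  | nil =>
      intro pre prev v acc
      rw [ctr_rollover_loop]
      simp [goSpec]
  | cons c cs ih =>
      intro pre prev v acc
      rw [ctr_rollover_loop]
      have hk : pre.length + 1 < (pre ++ prev :: c :: cs).length := by
        simp
      have h1 : (PySem.List.pyGet? (pre ++ prev :: c :: cs) ((pre.length + 1 : Nat) : Int)).getD 0 = c := by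
        rw [PySem.List.pyGet?_natCast]
        simp
      have h0 : (PySem.List.pyGet? (pre ++ prev :: c :: cs) (((pre.length + 1 : Nat) : Int) - 1)).getD 0 = prev := by
        have : (((pre.length + 1 : Nat) : Int) - 1) = ((pre.length : Nat) : Int) := by push_cast; ring
        rw [this, PySem.List.pyGet?_natCast]
        simp
      rw [dif_pos hk]
      simp only [h1, h0]
      have hre : pre ++ prev :: c :: cs = (pre ++ [prev]) ++ c :: cs := by simp
      have hlen : pre.length + 1 + 1 = (pre ++ [prev]).length + 1 := by simp
      rw [hre, hlen, ih (pre ++ [prev]) c _ _]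
      by_cases hc : c < prev <;> simp [goSpec, hc]

-- B-side analysis: the descent test on a Nat index
def descB (ctr : List Int) (k : Nat) : Bool := decide (ctr.getD k 0 < ctr.getD (k - 1) 0)

theorem altDesc_natCast (ctr : List Int) (s : Nat) (hs : 1 ≤ s) :
    altDesc ctr (s : Int) = descB ctr s := by
  unfold altDesc descB
  rw [show ((s : Int) - 1) = ((s - 1 : Nat) : Int) by omega]
  simp [PySem.List.pyGet?_natCast, List.getD_eq_getElem?_getD]

-- the first descent position ≥ s (what the breaks table stores between two consumed entries)
def firstP (ctr : List Int) (s : Nat) : Option Nat :=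
  if _h : s < ctr.length then
    if descB ctr s then some s else firstP ctr (s + 1)
  else none
termination_by ctr.length - s

theorem firstP_bounds_fuel (ctr : List Int) :
    ∀ m s b, ctr.length - s ≤ m → firstP ctr s = some b → s ≤ b ∧ b < ctr.length := by
  intro m
  induction m with
  | zero =>
      intro s b hm h
      rw [firstP] at h
      have hs : ¬ s < ctr.length := by omega
      simp [hs] at h
  | succ m ih =>
      intro s b hm h
      rw [firstP] at h
      by_cases hs : s < ctr.length
      · simp only [dif_pos hs] at h
        by_cases hd : descB ctr s
        · simp [hd] at h; omega
        · simp [hd] at h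
          have := ih (s + 1) b (by omega) h
          omega
      · simp [hs] at h

theorem firstP_bounds (ctr : List Int) (s b : Nat) (h : firstP ctr s = some b) :
    s ≤ b ∧ b < ctr.length :=
  firstP_bounds_fuel ctr ctr.length s b (by omega) h

theorem filter_split_fuel (ctr : List Int) :
    ∀ m s, ctr.length - s ≤ m → 1 ≤ s →
    (PySem.List.pyRange (s : Int) (ctr.length : Int) 1).filter (altDesc ctr) =
      (match firstP ctr s with
       | none => []
       | some b => ((b : Int) :: (PySem.List.pyRange ((b : Int) + 1) (ctr.length : Int) 1).filter (altDesc ctr))) := by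
  intro m
  induction m with
  | zero =>
      intro s hm _
      have hs : ¬ s < ctr.length := by omega
      rw [firstP]
      rw [PySem.List.pyRange_one_eq_nil (by exact_mod_cast by omega)]
      simp [hs]
  | succ m ih =>
      intro s hm hs1
      by_cases hs : s < ctr.length
      · rw [PySem.List.pyRange_one_cons (by exact_mod_cast hs)]
        rw [List.filter_cons, altDesc_natCast ctr s hs1, firstP]
        by_cases hd : descB ctr s
        · simp [hs, hd]
        · have hcast : ((s : Int) + 1) = ((s + 1 : Nat) : Int) := by push_cast; ring
          rw [hcast]
          simp only [hd, dif_pos hs]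
          exact ih (s + 1) (by omega) (by omega)
      · have hs' : ¬ s < ctr.length := hs
        rw [firstP]
        rw [PySem.List.pyRange_one_eq_nil (by exact_mod_cast by omega)]
        simp [hs']

-- output from segment start s onwards, position s carrying rollover count v
def segTail (ctr : List Int) (s : Nat) (v : Int) : List Int :=
  (ctr.getD s 0 + 2 ^ 32 * v) :: goSpec (ctr.getD s 0) v (ctr.drop (s + 1))

theorem drop_getD_cons (ctr : List Int) (s : Nat) (hs : s < ctr.length) :
    ctr.drop s = ctr.getD s 0 :: ctr.drop (s + 1) := by
  rw [List.drop_eq_getElem_cons hs, List.getD_eq_getElem ctr 0 hs]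

theorem segTail_split_fuel (ctr : List Int) :
    ∀ m s v, ctr.length - s ≤ m → s < ctr.length →
    segTail ctr s v =
      (match firstP ctr (s + 1) with
       | none => (ctr.drop s).map (fun c => c + 2 ^ 32 * v)
       | some b => ((ctr.drop s).take (b - s)).map (fun c => c + 2 ^ 32 * v) ++ segTail ctr b (v + 1)) := by
  intro m
  induction m with
  | zero => intro s v hm hs; omega
  | succ m ih =>
      intro s v hm hs
      have hdrop := drop_getD_cons ctr s hs
      by_cases hs1 : s + 1 < ctr.length
      · have hdrop1 := drop_getD_cons ctr (s + 1) hs1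
        by_cases hd : ctr.getD (s + 1) 0 < ctr.getD s 0
        · -- descent right after s: segment is just [ctr[s]]
          have hdb : descB ctr (s + 1) = true := by
            unfold descB
            simp only [Nat.add_sub_cancel]
            exact decide_eq_true hd
          have hfp : firstP ctr (s + 1) = some (s + 1) := by
            rw [firstP]; simp [hs1, hdb]
          rw [hfp]
          unfold segTail
          rw [hdrop1]
          simp only [goSpec, if_pos hd]
          rw [hdrop]
          simp [segTail]
        · -- no descent at s+1: peel one element, recurse at s+1
          have hdb : descB ctr (s + 1) = false := by
            unfold descB
            simp only [Nat.add_sub_cancel]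
            exact decide_eq_false hd
          have hfp : firstP ctr (s + 1) = firstP ctr (s + 2) := by
            rw [firstP]; simp [hs1, hdb]
          rw [hfp]
          have hLHS : segTail ctr s v = (ctr.getD s 0 + 2 ^ 32 * v) :: segTail ctr (s + 1) v := by
            unfold segTail
            rw [hdrop1]
            simp only [goSpec, if_neg hd]
          rw [hLHS, ih (s + 1) v (by omega) hs1]
          rcases hfp2 : firstP ctr (s + 2) with _ | b
          · simp only []
            rw [hdrop, List.map_cons]
          · have hb := firstP_bounds ctr (s + 2) b hfp2
            simp only []
            rw [hdrop]
            have htake : (ctr.getD s 0 :: ctr.drop (s + 1)).take (b - s)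
                = ctr.getD s 0 :: (ctr.drop (s + 1)).take (b - (s + 1)) := by
              rw [show b - s = (b - (s + 1)) + 1 by omega, List.take_succ_cons]
            rw [htake, List.map_cons, List.cons_append]
      · -- s is the last index: no further descent, single-element remainder
        have hfp : firstP ctr (s + 1) = none := by
          rw [firstP]; simp [hs1]
        rw [hfp]
        have hnil : ctr.drop (s + 1) = [] := List.drop_eq_nil_of_le (by omega)
        unfold segTail
        rw [hnil, hdrop, hnil]
        simp [goSpec]

theorem fold_split_fuel (ctr : List Int) :
    ∀ m s v acc, ctr.length - s ≤ m → s < ctr.length →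
    ((((PySem.List.pyRange ((s : Int) + 1) (ctr.length : Int) 1).filter (altDesc ctr)) ++ [(ctr.length : Int)]).foldl
        (altStep ctr) (acc, (s : Int), 2 ^ 32 * v)).1
      = acc ++ segTail ctr s v := by
  intro m
  induction m with
  | zero => intro s v acc hm hs; omega
  | succ m ih =>
      intro s v acc hm hs
      have hcast : ((s : Int) + 1) = ((s + 1 : Nat) : Int) := by push_cast; ring
      rw [hcast, filter_split_fuel ctr ctr.length (s + 1) (by omega) (by omega)]
      rw [segTail_split_fuel ctr ctr.length s v (by omega) hs]
      rcases hfp : firstP ctr (s + 1) with _ | b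
      · simp only [List.nil_append, List.foldl_cons, List.foldl_nil, altStep]
        rw [PySem.List.slice_natCast]
        rw [List.take_of_length_le (by simp)]
      · have hb := firstP_bounds ctr (s + 1) b hfp
        simp only [List.cons_append, List.foldl_cons]
        have hoff : 2 ^ 32 * v + 2 ^ 32 = 2 ^ 32 * (v + 1) := by ring
        have hstep : altStep ctr (acc, (s : Int), 2 ^ 32 * v) (b : Int)
            = (acc ++ ((ctr.drop s).take (b - s)).map (fun c => c + 2 ^ 32 * v), (b : Int), 2 ^ 32 * (v + 1)) := by
          unfold altStep
          rw [PySem.List.slice_natCast, hoff]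
        rw [hstep, ih b (v + 1) _ (by omega) (by omega)]
        rw [List.append_assoc]

theorem ctr_rollover_eq_alt (ctr : List Int) : ctr_rollover ctr = ctr_rollover_alt ctr := by
  unfold ctr_rollover ctr_rollover_alt
  by_cases h : ctr.length < 100
  · simp [h]
  · rw [if_neg h, if_neg h]
    match ctr, h with
    | c :: cs, h =>
      have hA : ctr_rollover_loop (([] : List Int) ++ c :: cs) (([] : List Int).length + 1) 0
            [(PySem.List.pyGet? (c :: cs) 0).getD 0] = [(PySem.List.pyGet? (c :: cs) 0).getD 0] ++ goSpec c 0 cs :=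
        loopA_eq_goSpec cs [] c 0 _
      simp only [List.nil_append, List.length_nil, Nat.zero_add] at hA
      rw [hA]
      have hB := fold_split_fuel (c :: cs) (c :: cs).length 0 0 [] (by omega) (by simp)
      simp only [Nat.cast_zero, zero_add, mul_zero, List.nil_append] at hB
      rw [hB]
      simp [segTail, PySem.List.pyGet?, PySem.List.pyIdx?]

-- ===== VERDICT (by name: the statement is the Claim_ definition above) =====
theorem ctr_rollover_spec : Claim_equal_ctr_rollover := by
  intro ctr _
  unfold Spec_ctr_rollover
  exact ctr_rollover_eq_alt ctr
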